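-- pv_equiv track=rewrite | github.com/lemonsis/Oracle_Benchmark | platforms/encryption/hard/frequency_encryption_final.py | blackbox
-- ===== SOURCE A (Python) =====
-- def blackbox(plaintext):
--     # Helper: map letter to value (A-Z:0-25, a-z:26-51)
--     def letter_to_value(ch):
--         if 'A' <= ch <= 'Z':
--             return ord(ch) - ord('A')
--         elif 'a' <= ch <= 'z':
--             return ord(ch) - ord('a') + 26
--         else:
--             return None
--
--     # Helper: map value to letter
--     def value_to_letter(val):
--         if 0 <= val <= 25:
--             return chr(val + ord('A'))
--         elif 26 <= val <= 51:
--             return chr(val - 26 + ord('a'))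
--         else:
--             return None
--
--     # Preference order: A-Z, a-z
--     preference_order = [chr(i) for i in range(ord('A'), ord('Z')+1)] + [chr(i) for i in range(ord('a'), ord('z')+1)]
--
--     ciphertext = ""
--     prev_letters = ['H']  # p_0 = 'H'
--
--     for idx, ch in enumerate(plaintext):
--         if not (('A' <= ch <= 'Z') or ('a' <= ch <= 'z')):
--             # Keep blank spaces in the ciphertext
--             ciphertext += ch
--             continue
--
--         # Build frequency for p_0...p_{i-1}
--         freq_window = {}
--         for l in prev_letters:
--             freq_window[l] = freq_window.get(l, 0) + 1
--
--         max_freq = max(freq_window.values())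
--         # Get all letters with max_freq
--         candidates = [l for l in preference_order if freq_window.get(l, 0) == max_freq]
--         # Pick the first in preference order
--         shift_letter = candidates[0]
--         shift_value = letter_to_value(shift_letter)
--
--         # Encrypt current letter
--         p_value = letter_to_value(ch)
--         c_value = (p_value + shift_value) % 52
--         c_letter = value_to_letter(c_value)
--         ciphertext += c_letter
--
--         prev_letters.append(ch)
--
--     return ciphertext
-- ===== SOURCE B (Python) =====
-- def blackbox(plaintext):
--     # Pass 1: running frequency table (seeded with 'H') with an incrementally
--     # maintained least-valued argmax; record the shift value for each alphabetic
--     # position into a schedule.  Pass 2: apply the schedule.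
--     def l2v(ch):
--         o = ord(ch)
--         if 65 <= o <= 90:
--             return o - 65
--         if 97 <= o <= 122:
--             return o - 97 + 26
--         return None
--
--     def v2l(v):
--         return chr(v + 65) if v < 26 else chr(v - 26 + 97)
--
--     counts = [0] * 52
--     counts[7] = 1  # seed p_0 = 'H'
--     best = 7
--     schedule = []
--     for ch in plaintext:
--         v = l2v(ch)
--         if v is None:
--             continue
--         schedule.append(best)
--         counts[v] += 1
--         if counts[v] > counts[best] or (counts[v] == counts[best] and v < best):
--             best = v
--
--     out = []
--     i = 0
--     for ch in plaintext:
--         v = l2v(ch)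
--         if v is None:
--             out.append(ch)
--         else:
--             out.append(v2l((v + schedule[i]) % 52))
--             i += 1
--     return "".join(out)
-- ===== Notes on version B (the rewrite author's own statement) =====
-- stated objective: faster
-- what changed: A rebuilds a frequency dict from all previous letters and scans all 52 preference letters for every alphabetic character; B makes one pass maintaining a 52-entry count array with an incrementally updated least-valued argmax, materialising a shift schedule that a second pass then applies.
import Mathlib
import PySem

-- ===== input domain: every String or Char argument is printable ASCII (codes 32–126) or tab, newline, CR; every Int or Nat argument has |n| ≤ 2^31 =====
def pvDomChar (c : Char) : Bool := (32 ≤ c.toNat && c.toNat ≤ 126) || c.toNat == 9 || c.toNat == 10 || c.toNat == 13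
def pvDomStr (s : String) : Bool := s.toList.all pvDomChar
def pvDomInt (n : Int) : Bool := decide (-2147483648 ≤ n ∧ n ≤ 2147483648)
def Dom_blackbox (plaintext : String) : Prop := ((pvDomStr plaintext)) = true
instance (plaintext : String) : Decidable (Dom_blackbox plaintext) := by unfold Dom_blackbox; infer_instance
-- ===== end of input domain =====

-- B replaces A's per-character frequency-dict rebuild + 52-letter candidate scan by one pass
-- that maintains the counts and the least-valued argmax incrementally, materialising a shift
-- schedule that a second pass then applies (objective: faster).

-- ===== PORT A =====
-- letter_to_value: A-Z ↦ 0-25, a-z ↦ 26-51, else None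
def aLetterToValue (ch : Char) : Option Int :=
  if 'A' ≤ ch ∧ ch ≤ 'Z' then some ((ch.toNat : Int) - 65)
  else if 'a' ≤ ch ∧ ch ≤ 'z' then some ((ch.toNat : Int) - 97 + 26)
  else none

-- value_to_letter
def aValueToLetter (val : Int) : Option Char :=
  if 0 ≤ val ∧ val ≤ 25 then some (Char.ofNat (val.toNat + 65))
  else if 26 ≤ val ∧ val ≤ 51 then some (Char.ofNat (val.toNat - 26 + 97))
  else none

-- preference_order = [chr(i) for i in range(ord('A'), ord('Z')+1)] + [chr(i) for i in range(ord('a'), ord('z')+1)]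
def preferenceOrder : List Char :=
  (List.range 26).map (fun i => Char.ofNat (65 + i)) ++ (List.range 26).map (fun i => Char.ofNat (97 + i))

-- the body of A's for-loop; state = (ciphertext as chars, prev_letters)
def aStep (st : List Char × List Char) (ch : Char) : List Char × List Char :=
  if ¬ (('A' ≤ ch ∧ ch ≤ 'Z') ∨ ('a' ≤ ch ∧ ch ≤ 'z')) then (st.1 ++ [ch], st.2)
  else
    let freqWindow := st.2.foldl (fun d l => d.insert l (d.getD l 0 + 1)) (PySem.Dict.empty : PySem.Dict Char Int)
    let maxFreq := (PySem.List.max? freqWindow.values (fun y => y)).getD 0   -- values nonempty on reachable states ('H' seed)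
    let candidates := preferenceOrder.filter (fun l => freqWindow.getD l 0 == maxFreq)
    let shiftLetter := candidates.head?.getD 'A'                             -- candidates[0]; nonempty on reachable states
    let shiftValue := (aLetterToValue shiftLetter).getD 0
    let pValue := (aLetterToValue ch).getD 0
    let cValue := PySem.Int.mod (pValue + shiftValue) 52
    let cLetter := (aValueToLetter cValue).getD 'A'                          -- always some on reachable states
    (st.1 ++ [cLetter], st.2 ++ [ch])

def blackbox (plaintext : String) : String :=
  String.mk (plaintext.toList.foldl aStep ([], ['H'])).1

-- ===== PORT B =====
def bL2v (ch : Char) : Option Nat :=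
  if 65 ≤ ch.toNat ∧ ch.toNat ≤ 90 then some (ch.toNat - 65)
  else if 97 ≤ ch.toNat ∧ ch.toNat ≤ 122 then some (ch.toNat - 97 + 26)
  else none

def bV2l (v : Nat) : Char :=
  if v < 26 then Char.ofNat (v + 65) else Char.ofNat (v - 26 + 97)

-- pass 1 loop body; state = (counts, best, schedule)
def bPass1Step (st : List Nat × Nat × List Nat) (ch : Char) : List Nat × Nat × List Nat :=
  match bL2v ch with
  | none => st
  | some v =>
    let counts := st.1
    let best := st.2.1
    let sched := st.2.2 ++ [best]
    let counts := counts.set v (counts.getD v 0 + 1)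
    let best :=
      if counts.getD v 0 > counts.getD best 0 ∨ (counts.getD v 0 = counts.getD best 0 ∧ v < best)
      then v else best
    (counts, best, sched)

-- pass 2 loop body; state = (out, remaining schedule)  (schedule[i], i += 1 ≡ consume head)
def bPass2Step (st : List Char × List Nat) (ch : Char) : List Char × List Nat :=
  match bL2v ch with
  | none => (st.1 ++ [ch], st.2)
  | some v => (st.1 ++ [bV2l ((v + st.2.headD 0) % 52)], st.2.tail)

def bInitCounts : List Nat := (List.replicate 52 0).set 7 1   -- counts = [0]*52; counts[7] = 1

def blackbox_alt (plaintext : String) : String :=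
  let sched := (plaintext.toList.foldl bPass1Step (bInitCounts, 7, [])).2.2
  String.mk (plaintext.toList.foldl bPass2Step ([], sched)).1

-- ===== PRECONDITION & SPEC =====
def Spec_blackbox (plaintext : String) (out : String) : Prop := out = blackbox_alt plaintext
instance (plaintext : String) (out : String) : Decidable (Spec_blackbox plaintext out) := by unfold Spec_blackbox; infer_instance

-- ===== CLAIM (what is proved, stated in full; the proofs are below) =====
def Claim_equal_blackbox : Prop := ∀ (plaintext : String), Dom_blackbox plaintext → Spec_blackbox plaintext (blackbox plaintext)

-- ===== LEMMAS AND PROOFS =====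

lemma charLe (a b : Char) : (a ≤ b) ↔ (a.toNat ≤ b.toNat) := by
  rw [Char.le_def, UInt32.le_iff_toNat_le]; rfl

lemma bL2v_none_iff (ch : Char) :
    bL2v ch = none ↔ ¬ (('A' ≤ ch ∧ ch ≤ 'Z') ∨ ('a' ≤ ch ∧ ch ≤ 'z')) := by
  simp only [charLe]
  unfold bL2v
  split_ifs <;> simp <;> omega

lemma bL2v_lt (ch : Char) (v : Nat) (h : bL2v ch = some v) : v < 52 := by
  unfold bL2v at h
  split_ifs at h <;> simp_all <;> omega

lemma aL2v_eq (ch : Char) : aLetterToValue ch = (bL2v ch).map (fun n => (n : Int)) := by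
  unfold aLetterToValue bL2v
  simp only [charLe, show 'A'.toNat = 65 from rfl, show 'Z'.toNat = 90 from rfl,
    show 'a'.toNat = 97 from rfl, show 'z'.toNat = 122 from rfl]
  split_ifs <;> simp <;> omega

lemma bL2v_bV2l (v : Nat) (h : v < 52) : bL2v (bV2l v) = some v := by
  interval_cases v <;> decide

lemma eq_bV2l_of_bL2v (ch : Char) (v : Nat) (h : bL2v ch = some v) : ch = bV2l v := by
  have hofnat : Char.ofNat ch.toNat = ch := Char.ofNat_toNat ch
  unfold bL2v at h
  unfold bV2l
  split_ifs at h with h1 h2 <;> rw [Option.some_inj] at h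
  · rw [if_pos (by omega), ← hofnat]; congr 1; omega
  · rw [if_neg (by omega), ← hofnat]; congr 1; omega

lemma aV2l_of_lt (n : Nat) (h : n < 52) : aValueToLetter (n : Int) = some (bV2l n) := by
  unfold aValueToLetter bV2l
  split_ifs <;> first | omega | rw [Int.toNat_natCast]

def cnt (prev : List Char) (v : Nat) : Nat := prev.countP (fun c => bL2v c == some v)

def StInv (prev : List Char) (counts : List Nat) (best : Nat) : Prop :=
  counts.length = 52 ∧ (∀ w, w < 52 → counts.getD w 0 = cnt prev w) ∧
  best < 52 ∧ (∀ w, w < 52 → cnt prev w ≤ cnt prev best) ∧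
  (∀ w, w < best → cnt prev w < cnt prev best) ∧
  prev ≠ [] ∧ (∀ c ∈ prev, (bL2v c).isSome)

lemma cnt_append (prev : List Char) (c : Char) (v w : Nat) (h : bL2v c = some v) :
    cnt (prev ++ [c]) w = cnt prev w + (if w = v then 1 else 0) := by
  unfold cnt
  rw [List.countP_append]
  congr 1
  rw [List.countP_cons, List.countP_nil, h]
  split_ifs with hw <;> simp_all

lemma cnt_H (w : Nat) : cnt ['H'] w = if w = 7 then 1 else 0 := by
  simp [cnt, List.countP_cons, show bL2v 'H' = some 7 from rfl]
  split_ifs <;> simp_all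

lemma count_eq_cnt (prev : List Char) (c : Char) (v : Nat) (h : bL2v c = some v) :
    prev.count c = cnt prev v := by
  unfold cnt
  rw [List.count_eq_countP]
  apply List.countP_congr
  intro x _
  simp only [beq_iff_eq]
  constructor
  · rintro rfl; simp [h]
  · intro hx
    rw [eq_bV2l_of_bL2v x v (by simpa using hx), eq_bV2l_of_bL2v c v h]

lemma initCounts_length : bInitCounts.length = 52 := by
  unfold bInitCounts
  rw [List.length_set, List.length_replicate]

lemma inv_init : StInv ['H'] bInitCounts 7 := by
  refine ⟨initCounts_length, ?_, by omega, ?_, ?_, by simp, ?_⟩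
  · intro w hw
    rw [cnt_H]
    rw [List.getD_eq_getElem _ _ (by rw [initCounts_length]; exact hw)]
    unfold bInitCounts
    rw [List.getElem_set]
    split_ifs <;> first | omega | rw [List.getElem_replicate]
  · intro w hw; rw [cnt_H, cnt_H]; split_ifs <;> omega
  · intro w hw; rw [cnt_H, cnt_H]; split_ifs <;> omega
  · intro c hc
    rw [List.mem_singleton] at hc
    subst hc
    rfl

lemma getD_set_52 (counts : List Nat) (hl : counts.length = 52) (v w x : Nat)
    (hw : w < 52) :
    (counts.set v x).getD w 0 = if w = v then x else counts.getD w 0 := by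
  rw [List.getD_eq_getElem _ _ (by rw [List.length_set, hl]; exact hw),
      List.getElem_set]
  split_ifs with h1 h2 h3
  · rfl
  · omega
  · omega
  · rw [List.getD_eq_getElem _ _ (by rw [hl]; exact hw)]

lemma argmax_step (f f' : Nat → Nat) (v best : Nat) (hv : v < 52) (hb : best < 52)
    (hf : ∀ w, w ≠ v → f' w = f w) (hfv : f' v = f v + 1)
    (hmax : ∀ w, w < 52 → f w ≤ f best) (hleast : ∀ w, w < best → f w < f best) :
    (if f' v > f' best ∨ (f' v = f' best ∧ v < best) then v else best) < 52 ∧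
    (∀ w, w < 52 → f' w ≤ f' (if f' v > f' best ∨ (f' v = f' best ∧ v < best) then v else best)) ∧
    (∀ w, w < (if f' v > f' best ∨ (f' v = f' best ∧ v < best) then v else best) →
      f' w < f' (if f' v > f' best ∨ (f' v = f' best ∧ v < best) then v else best)) := by
  by_cases hbq : best = v
  · subst hbq
    rw [if_neg (by omega)]
    refine ⟨hb, ?_, ?_⟩
    · intro w hw
      by_cases hwv : w = best
      · subst hwv; omega
      · have := hf w hwv; have := hmax w hw; omega
    · intro w hw
      have hwv : w ≠ best := by omega
      have := hf w hwv; have := hleast w hw; omega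
  · have hfb : f' best = f best := hf best hbq
    split_ifs with hc
    · refine ⟨hv, ?_, ?_⟩
      · intro w hw
        by_cases hwv : w = v
        · subst hwv; omega
        · have := hf w hwv; have := hmax w hw; omega
      · intro w hw
        have hwv : w ≠ v := by omega
        have := hf w hwv
        rcases hc with hc | ⟨hc1, hc2⟩
        · have := hmax w (by omega); omega
        · have := hleast w (by omega); omega
    · rw [not_or, not_lt, not_and_or, not_lt] at hc
      refine ⟨hb, ?_, ?_⟩
      · intro w hw
        by_cases hwv : w = v
        · subst hwv; omega
        · have := hf w hwv; have := hmax w hw; omega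
      · intro w hw
        by_cases hwv : w = v
        · subst hwv
          have h1 := hc.1
          have h2 := hc.2
          omega
        · have := hf w hwv; have := hleast w hw; omega

lemma inv_step (prev : List Char) (counts : List Nat) (best : Nat)
    (hI : StInv prev counts best) (ch : Char) (v : Nat) (h : bL2v ch = some v) :
    StInv (prev ++ [ch])
      (counts.set v (counts.getD v 0 + 1))
      (if (counts.set v (counts.getD v 0 + 1)).getD v 0 > (counts.set v (counts.getD v 0 + 1)).getD best 0
         ∨ ((counts.set v (counts.getD v 0 + 1)).getD v 0 = (counts.set v (counts.getD v 0 + 1)).getD best 0 ∧ v < best)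
       then v else best) := by
  obtain ⟨hl, hg, hb, hmax, hleast, hne, hall⟩ := hI
  have hv : v < 52 := bL2v_lt ch v h
  have hcnt : ∀ w, cnt (prev ++ [ch]) w = cnt prev w + (if w = v then 1 else 0) :=
    fun w => cnt_append prev ch v w h
  have hf : ∀ w, w ≠ v → cnt (prev ++ [ch]) w = cnt prev w := by
    intro w hwv; rw [hcnt w, if_neg hwv]; omega
  have hfv : cnt (prev ++ [ch]) v = cnt prev v + 1 := by
    rw [hcnt v, if_pos rfl]
  have hg' : ∀ w, w < 52 →
      (counts.set v (counts.getD v 0 + 1)).getD w 0 = cnt (prev ++ [ch]) w := by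
    intro w hw
    rw [getD_set_52 counts hl v w _ hw, hcnt w, hg v hv]
    split_ifs with h1
    · subst h1; rfl
    · rw [hg w hw]; omega
  have hbv : (counts.set v (counts.getD v 0 + 1)).getD best 0 = cnt (prev ++ [ch]) best :=
    hg' best hb
  have hvv : (counts.set v (counts.getD v 0 + 1)).getD v 0 = cnt (prev ++ [ch]) v :=
    hg' v hv
  have harg := argmax_step (cnt prev) (cnt (prev ++ [ch])) v best hv hb hf hfv hmax hleast
  rw [hbv, hvv]
  refine ⟨by rw [List.length_set, hl], ?_, harg.1, harg.2.1, harg.2.2, by simp, ?_⟩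
  · intro w hw
    rw [hg' w hw]
  · intro c hc
    rw [List.mem_append, List.mem_singleton] at hc
    rcases hc with hc | rfl
    · exact hall c hc
    · rw [h]; rfl

lemma filter_head {α : Type} (p : α → Bool) :
    ∀ (l : List α) (b : Nat) (hb : b < l.length), p (l[b]) = true →
      (∀ i (hi : i < b), p (l[i]'(Nat.lt_trans hi hb)) = false) →
      (l.filter p).head? = some (l[b]) := by
  intro l
  induction l with
  | nil => intro b hb; exact absurd hb (by simp)
  | cons x t ih =>
    intro b hb hp hlt
    cases b with
    | zero =>
      simp only [List.getElem_cons_zero] at hp ⊢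
      rw [List.filter_cons_of_pos hp]
      rfl
    | succ b =>
      have hx : p x = false := hlt 0 (Nat.succ_pos b)
      rw [List.filter_cons_of_neg (by simp [hx])]
      simp only [List.getElem_cons_succ]
      exact ih b (by simpa using hb) hp (fun i hi => hlt (i + 1) (by omega))

lemma pref_length : preferenceOrder.length = 52 := by decide

lemma pref_getD : ∀ (i : Fin 52), preferenceOrder.getD i.val 'A' = bV2l i.val := by decide

lemma pref_get (i : Nat) (h : i < 52) :
    preferenceOrder[i]'(by rw [pref_length]; exact h) = bV2l i := by
  have := pref_getD ⟨i, h⟩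
  rwa [List.getD_eq_getElem _ _ (by rw [pref_length]; exact h)] at this

lemma cnt_pos_exists (prev : List Char) (w : Nat) (h : 0 < cnt prev w) :
    ∃ c ∈ prev, bL2v c = some w := by
  unfold cnt at h
  rw [List.countP_pos_iff] at h
  obtain ⟨c, hc, hpc⟩ := h
  exact ⟨c, hc, by simpa using hpc⟩

lemma cnt_best_pos (prev : List Char) (best : Nat)
    (hne : prev ≠ []) (hall : ∀ c ∈ prev, (bL2v c).isSome)
    (hmax : ∀ w, w < 52 → cnt prev w ≤ cnt prev best) : 0 < cnt prev best := by
  obtain ⟨p, rest, rfl⟩ := List.exists_cons_of_ne_nil hne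
  obtain ⟨vp, hvp⟩ := Option.isSome_iff_exists.mp (hall p List.mem_cons_self)
  have h1 : 0 < cnt (p :: rest) vp := by
    unfold cnt
    rw [List.countP_pos_iff]
    exact ⟨p, List.mem_cons_self, by simp [hvp]⟩
  have := hmax vp (bL2v_lt p vp hvp)
  omega

lemma maxFreq_eq (prev : List Char) (best : Nat)
    (hne : prev ≠ []) (hall : ∀ c ∈ prev, (bL2v c).isSome)
    (_hb : best < 52) (hmax : ∀ w, w < 52 → cnt prev w ≤ cnt prev best) :
    (PySem.List.max? (PySem.Dict.counter prev).values (fun y => y)).getD 0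
      = (cnt prev best : Int) := by
  have hvals : (PySem.Dict.counter prev).values
      = (PySem.Set.ofList prev).map (fun k => ((List.count k prev : Nat) : Int)) := by
    rw [PySem.Dict.values_eq_map_keys _ (PySem.Dict.nodup_keys_counter prev) 0,
        PySem.Dict.keys_counter]
    exact List.map_congr_left (fun k _ => PySem.Dict.getD_counter prev k)
  -- the best count is a value of the dict
  obtain ⟨c, hcmem, hcv⟩ := cnt_pos_exists prev best (cnt_best_pos prev best hne hall hmax)
  have hcount : List.count c prev = cnt prev best := count_eq_cnt prev c best hcv
  have hmem : (cnt prev best : Int) ∈ (PySem.Dict.counter prev).values := by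
    rw [hvals]
    refine List.mem_map.mpr ⟨c, ?_, by rw [hcount]⟩
    exact (PySem.Set.mem_ofList prev c).mpr hcmem
  -- max? is some
  cases hm : PySem.List.max? (PySem.Dict.counter prev).values (fun y => y) with
  | none =>
    rw [PySem.List.max?_eq_none_iff] at hm
    rw [hm] at hmem
    simp at hmem
  | some m =>
    have hle : (cnt prev best : Int) ≤ m := PySem.List.max?_isMax hm _ hmem
    have hmm : m ∈ (PySem.Dict.counter prev).values := PySem.List.max?_mem hm
    rw [hvals, List.mem_map] at hmm
    obtain ⟨k, hk, rfl⟩ := hmm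
    rw [PySem.Set.mem_ofList] at hk
    obtain ⟨vk, hvk⟩ := Option.isSome_iff_exists.mp (hall k hk)
    have h1 : List.count k prev = cnt prev vk := count_eq_cnt prev k vk hvk
    have h2 : cnt prev vk ≤ cnt prev best := hmax vk (bL2v_lt k vk hvk)
    simp only [Option.getD_some]
    rw [h1]
    omega

lemma candidates_head (prev : List Char) (best : Nat)
    (hb : best < 52) (_hmax : ∀ w, w < 52 → cnt prev w ≤ cnt prev best)
    (hleast : ∀ w, w < best → cnt prev w < cnt prev best) :
    (preferenceOrder.filter
        (fun l => (PySem.Dict.counter prev).getD l 0 == (cnt prev best : Int))).head?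
      = some (bV2l best) := by
  have hcnt_pref : ∀ (i : Nat), i < 52 →
      (PySem.Dict.counter prev).getD (bV2l i) 0 = (cnt prev i : Int) := by
    intro i hi
    rw [PySem.Dict.getD_counter]
    rw [count_eq_cnt prev (bV2l i) i (bL2v_bV2l i hi)]
  have hp : (fun l => (PySem.Dict.counter prev).getD l 0 == (cnt prev best : Int))
      (preferenceOrder[best]'(by rw [pref_length]; exact hb)) = true := by
    rw [pref_get best hb]
    simp only [hcnt_pref best hb]
    exact beq_self_eq_true _
  have hlt : ∀ i (hi : i < best),
      (fun l => (PySem.Dict.counter prev).getD l 0 == (cnt prev best : Int))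
        (preferenceOrder[i]'(Nat.lt_trans hi (by rw [pref_length]; exact hb))) = false := by
    intro i hi
    rw [pref_get i (by omega)]
    simp only [hcnt_pref i (by omega)]
    have := hleast i hi
    simp only [beq_eq_false_iff_ne, ne_eq]
    intro hcontra
    have : cnt prev i = cnt prev best := by exact_mod_cast hcontra
    omega
  rw [filter_head _ preferenceOrder best (by rw [pref_length]; exact hb) hp hlt,
      pref_get best hb]

lemma aStep_alpha (out prev : List Char) (counts : List Nat) (best : Nat)
    (hI : StInv prev counts best) (ch : Char) (v : Nat) (h : bL2v ch = some v) :
    aStep (out, prev) ch = (out ++ [bV2l ((v + best) % 52)], prev ++ [ch]) := by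
  obtain ⟨hl, hg, hb, hmax, hleast, hne, hall⟩ := hI
  have halpha : ('A' ≤ ch ∧ ch ≤ 'Z') ∨ ('a' ≤ ch ∧ ch ≤ 'z') := by
    by_contra hc
    rw [← bL2v_none_iff] at hc
    rw [h] at hc
    exact Option.some_ne_none v hc
  unfold aStep
  rw [if_neg (not_not_intro halpha)]
  simp only [PySem.Dict.foldl_insert_getD_add_one_eq_counter,
    maxFreq_eq prev best hne hall hb hmax,
    candidates_head prev best hb hmax hleast,
    Option.getD_some]
  have hsv : (aLetterToValue (bV2l best)).getD 0 = (best : Int) := by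
    rw [aL2v_eq, bL2v_bV2l best hb]
    rfl
  have hpv : (aLetterToValue ch).getD 0 = (v : Int) := by
    rw [aL2v_eq, h]
    rfl
  rw [hsv, hpv]
  have hmod : PySem.Int.mod ((v : Int) + (best : Int)) 52 = (((v + best) % 52 : Nat) : Int) := by
    rw [PySem.Int.mod_eq_emod_of_pos (by omega)]
    omega
  rw [hmod, aV2l_of_lt ((v + best) % 52) (Nat.mod_lt _ (by omega))]
  rfl

lemma aStep_nonalpha (out prev : List Char) (ch : Char) (h : bL2v ch = none) :
    aStep (out, prev) ch = (out ++ [ch], prev) := by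
  unfold aStep
  rw [if_pos ((bL2v_none_iff ch).mp h)]

-- the fused one-pass form of B, used only to organise the proof
def fusedStep (st : List Char × List Nat × Nat) (ch : Char) : List Char × List Nat × Nat :=
  match bL2v ch with
  | none => (st.1 ++ [ch], st.2)
  | some v =>
    let counts := st.2.1
    let best := st.2.2
    let out := st.1 ++ [bV2l ((v + best) % 52)]
    let counts' := counts.set v (counts.getD v 0 + 1)
    let best' :=
      if counts'.getD v 0 > counts'.getD best 0 ∨ (counts'.getD v 0 = counts'.getD best 0 ∧ v < best)
      then v else best
    (out, counts', best')

lemma pass1_split (cs : List Char) : ∀ (c : List Nat) (b : Nat) (s0 : List Nat),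
    cs.foldl bPass1Step (c, b, s0) =
      ((cs.foldl bPass1Step (c, b, [])).1, (cs.foldl bPass1Step (c, b, [])).2.1,
       s0 ++ (cs.foldl bPass1Step (c, b, [])).2.2) := by
  induction cs with
  | nil => intro c b s0; simp
  | cons ch t ih =>
    intro c b s0
    simp only [List.foldl_cons]
    cases h : bL2v ch with
    | none =>
      simp only [bPass1Step, h]
      exact ih c b s0
    | some v =>
      simp only [bPass1Step, h]
      rw [ih _ _ (s0 ++ [b]), ih _ _ ([] ++ [b])]
      simp [List.append_assoc]

lemma fuse (cs : List Char) : ∀ (out : List Char) (c : List Nat) (b : Nat) (rest : List Nat),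
    cs.foldl bPass2Step (out, (cs.foldl bPass1Step (c, b, [])).2.2 ++ rest)
      = ((cs.foldl fusedStep (out, c, b)).1, rest) := by
  induction cs with
  | nil => intro out c b rest; simp
  | cons ch t ih =>
    intro out c b rest
    simp only [List.foldl_cons]
    cases h : bL2v ch with
    | none =>
      simp only [bPass1Step, bPass2Step, fusedStep, h]
      exact ih (out ++ [ch]) c b rest
    | some v =>
      simp only [bPass1Step, fusedStep, h]
      rw [pass1_split t _ _ ([] ++ [b])]
      simp only [List.nil_append, List.cons_append]
      simp only [bPass2Step, h, List.headD_cons, List.tail_cons]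
      exact ih _ _ _ rest

lemma a_eq_fused (cs : List Char) : ∀ (out prev : List Char) (counts : List Nat) (best : Nat),
    StInv prev counts best →
    (cs.foldl aStep (out, prev)).1 = (cs.foldl fusedStep (out, counts, best)).1 := by
  induction cs with
  | nil => intro out prev counts best _; rfl
  | cons ch t ih =>
    intro out prev counts best hI
    simp only [List.foldl_cons]
    cases h : bL2v ch with
    | none =>
      rw [aStep_nonalpha out prev ch h]
      simp only [fusedStep, h]
      exact ih (out ++ [ch]) prev counts best hI
    | some v =>
      rw [aStep_alpha out prev counts best hI ch v h]
      simp only [fusedStep, h]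
      exact ih _ _ _ _ (inv_step prev counts best hI ch v h)

theorem blackbox_eq (s : String) : blackbox s = blackbox_alt s := by
  unfold blackbox blackbox_alt
  congr 1
  have h := fuse s.toList [] bInitCounts 7 []
  rw [List.append_nil] at h
  rw [h]
  exact a_eq_fused s.toList [] ['H'] bInitCounts 7 inv_init

-- ===== VERDICT (by name: the statement is the Claim_ definition above) =====
theorem blackbox_spec : Claim_equal_blackbox := by
  intro s _
  exact blackbox_eq s
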